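-- pv_equiv track=rewrite | github.com/JuanPyV/Python | ListaAnidada/Matriz_A00368753.py | creaMatriz4
-- ===== SOURCE A (Python) =====
-- def creaMatriz4(c):
--     lista4 = []
--     for i in range(c):
--         lista_4 = []
--         for num in range(c):
--             lista_4.append(i+1)
--             i = c + i
--         lista4.append(lista_4)
--     return lista4
-- ===== SOURCE B (Python) =====
-- def creaMatriz4(c):
--     # The row-major matrix of consecutive integers, then its transpose via zip.
--     N = (range(k * c + 1, (k + 1) * c + 1) for k in range(c))
--     return [list(col) for col in zip(*N)]
-- ===== Notes on version B (the rewrite author's own statement) =====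
-- stated objective: alternative
-- what changed: Replaces A's single accumulating nested loop (which rebinds the loop variable i inside the inner loop) by a two-step construction: form the rows of the row-major matrix of consecutive integers as ranges, then transpose them with zip(*rows).
import Mathlib
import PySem

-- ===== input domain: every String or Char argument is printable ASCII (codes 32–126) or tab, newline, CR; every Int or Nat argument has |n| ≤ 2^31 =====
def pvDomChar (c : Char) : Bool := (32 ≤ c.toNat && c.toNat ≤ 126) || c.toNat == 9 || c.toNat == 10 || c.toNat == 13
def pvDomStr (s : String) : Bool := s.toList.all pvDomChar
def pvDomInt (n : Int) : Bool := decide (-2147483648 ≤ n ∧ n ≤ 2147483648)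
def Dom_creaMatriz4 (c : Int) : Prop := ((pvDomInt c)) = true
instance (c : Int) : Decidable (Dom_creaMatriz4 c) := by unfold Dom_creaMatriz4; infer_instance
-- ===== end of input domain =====

-- B builds the row-major matrix of consecutive integers and transposes it (build-then-transpose),
-- instead of A's single accumulating nested loop; objective: alternative decomposition.


-- ===== PORT A =====
-- literal transliteration: outer loop over range(c); inner loop appends i+1 and rebinds i = c + i
def creaMatriz4 (c : Int) : List (List Int) :=
  (PySem.List.pyRange 0 c 1).foldl
    (fun lista4 i =>
      let st := (PySem.List.pyRange 0 c 1).foldl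
        (fun (st : List Int × Int) _num => (st.1 ++ [st.2 + 1], c + st.2)) ([], i)
      lista4 ++ [st.1]) []

-- ===== PORT B =====
-- zip(*rows) wrapped to lists: stops as soon as some row is exhausted (or there are no rows)
def pvZipStar (rows : List (List Int)) : List (List Int) :=
  if h : rows.isEmpty || rows.any (·.isEmpty) then []
  else (rows.map (fun r => r.headD 0)) :: pvZipStar (rows.map (fun r => r.tail))
termination_by (rows.headD []).length
decreasing_by
  simp only [Bool.or_eq_true, List.isEmpty_iff, List.any_eq_true, not_or, not_exists] at h
  obtain ⟨h1, h2⟩ := h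
  match rows, h1 with
  | r :: rs, _ =>
    have hr : r ≠ [] := by
      intro hnil
      exact h2 r ⟨by simp, by simp [hnil]⟩
    have hpos : 0 < r.length := List.length_pos_of_ne_nil hr
    simp only [List.attach_cons, List.map_cons, List.headD_cons, List.length_tail]
    omega

def creaMatriz4_alt (c : Int) : List (List Int) :=
  let N := (PySem.List.pyRange 0 c 1).map
    (fun k => PySem.List.pyRange (k * c + 1) ((k + 1) * c + 1) 1)
  pvZipStar N

-- ===== PRECONDITION & SPEC =====
def Spec_creaMatriz4 (c : Int) (out : List (List Int)) : Prop := out = creaMatriz4_alt c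
instance (c : Int) (out : List (List Int)) : Decidable (Spec_creaMatriz4 c out) := by unfold Spec_creaMatriz4; infer_instance

-- ===== CLAIM (what is proved, stated in full; the proofs are below) =====
def Claim_equal_creaMatriz4 : Prop := ∀ (c : Int), Dom_creaMatriz4 c → Spec_creaMatriz4 c (creaMatriz4 c)

-- ===== LEMMAS AND PROOFS =====

-- both sides equal this closed form: entry [i][k] = k*c + i + 1
def pvMat (c : Int) : List (List Int) :=
  (List.range c.toNat).map
    (fun i : Nat => (List.range c.toNat).map (fun k : Nat => (k : Int) * c + (i : Int) + 1))

-- A's inner loop, with the rebound i threaded through the state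
theorem pvInnerFold (c : Int) (L : List Int) :
    ∀ (acc : List Int) (i0 : Int),
      L.foldl (fun (st : List Int × Int) _num => (st.1 ++ [st.2 + 1], c + st.2)) (acc, i0)
        = (acc ++ (List.range L.length).map (fun k : Nat => (k : Int) * c + i0 + 1),
           (L.length : Int) * c + i0) := by
  induction L with
  | nil => intro acc i0; simp
  | cons x xs ih =>
    intro acc i0
    simp only [List.foldl_cons, ih (acc ++ [i0 + 1]) (c + i0), List.length_cons,
      Prod.mk.injEq]
    refine ⟨?_, by push_cast; ring⟩
    rw [List.range_succ_eq_map]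
    simp only [List.map_cons, List.map_map, List.append_assoc, List.singleton_append,
      Nat.cast_zero, zero_mul, zero_add]
    congr 1
    congr 1
    apply List.map_congr_left
    intro k _
    simp only [Function.comp_apply]
    push_cast
    ring

-- a left fold that only appends is a map
theorem pvFoldAppend {α β : Type} (g : α → β) (L : List α) :
    ∀ (acc : List β), L.foldl (fun s i => s ++ [g i]) acc = acc ++ L.map g := by
  induction L with
  | nil => intro acc; simp
  | cons x xs ih => intro acc; simp [ih]

theorem pvA_closed (c : Int) : creaMatriz4 c = pvMat c := by
  unfold creaMatriz4
  rw [pvFoldAppend, List.nil_append, PySem.List.pyRange_one]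
  unfold pvMat
  simp only [List.map_map, Int.sub_zero]
  apply List.map_congr_left
  intro i _
  simp only [Function.comp_apply]
  rw [pvInnerFold]
  simp only [List.length_map, List.length_range]
  apply List.map_congr_left
  intro k _
  ring

-- transpose characterisation of pvZipStar on a nonempty rectangular list of rows
theorem pvZipStar_rect (n : Nat) :
    ∀ (rows : List (List Int)), rows ≠ [] → (∀ r ∈ rows, r.length = n) →
      pvZipStar rows = (List.range n).map (fun i => rows.map (fun r => r.getD i 0)) := by
  induction n with
  | zero =>
    intro rows hne hlen
    rw [pvZipStar]
    have hany : rows.any (·.isEmpty) = true := by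
      match rows, hne with
      | r :: rs, _ =>
        have : r.length = 0 := hlen r (by simp)
        simp [List.length_eq_zero_iff.mp this]
    simp [hany]
  | succ m ih =>
    intro rows hne hlen
    rw [pvZipStar]
    have hno : ∀ r ∈ rows, r ≠ [] := by
      intro r hr hnil
      have := hlen r hr
      simp [hnil] at this
    have hcond : (rows.isEmpty || rows.any (·.isEmpty)) = false := by
      simp only [Bool.or_eq_false_iff, List.isEmpty_eq_false_iff, List.any_eq_false]
      exact ⟨hne, fun r hr => by simpa [List.isEmpty_iff] using hno r hr⟩
    rw [dif_neg (by simp [hcond])]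
    have htail : ∀ r ∈ rows.map (fun r => r.tail), r.length = m := by
      intro r hr
      obtain ⟨r0, hr0, rfl⟩ := List.mem_map.mp hr
      have := hlen r0 hr0
      simp only [List.length_tail]
      omega
    have hmapne : rows.map (fun r => r.tail) ≠ [] := by simpa using hne
    rw [ih _ hmapne htail, List.range_succ_eq_map]
    simp only [List.map_cons, List.map_map]
    congr 1
    · apply List.map_congr_left
      intro r hr
      match r, hno r hr with
      | x :: t, _ => simp
    · apply List.map_congr_left
      intro i _
      simp only [Function.comp_apply]
      apply List.map_congr_left
      intro r hr
      match r, hno r hr with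
      | x :: t, _ => simp

theorem pvB_closed (c : Int) : creaMatriz4_alt c = pvMat c := by
  unfold creaMatriz4_alt
  by_cases hc : c ≤ 0
  · rw [PySem.List.pyRange_one_eq_nil (by omega)]
    rw [pvZipStar]
    simp [pvMat, Int.toNat_of_nonpos hc]
  · push_neg at hc
    have hrow : ∀ k : Int, PySem.List.pyRange (k * c + 1) ((k + 1) * c + 1) 1
        = (List.range c.toNat).map (fun j : Nat => k * c + 1 + (j : Int)) := by
      intro k
      rw [PySem.List.pyRange_one]
      congr 2
      have h1 : (k + 1) * c + 1 - (k * c + 1) = c := by ring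
      rw [h1]
    have hlen : ∀ r ∈ (PySem.List.pyRange 0 c 1).map
        (fun k => PySem.List.pyRange (k * c + 1) ((k + 1) * c + 1) 1), r.length = c.toNat := by
      intro r hr
      obtain ⟨k, _, rfl⟩ := List.mem_map.mp hr
      rw [hrow k]
      simp
    have hne : (PySem.List.pyRange 0 c 1).map
        (fun k => PySem.List.pyRange (k * c + 1) ((k + 1) * c + 1) 1) ≠ [] := by
      intro h
      have hl := congrArg List.length h
      rw [List.length_map, PySem.List.length_pyRange_one] at hl
      simp at hl
      omega
    rw [pvZipStar_rect c.toNat _ hne hlen]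
    unfold pvMat
    apply List.map_congr_left
    intro i hi
    rw [List.mem_range] at hi
    simp only [List.map_map]
    rw [PySem.List.pyRange_one]
    simp only [List.map_map, Int.sub_zero]
    apply List.map_congr_left
    intro k _
    simp only [Function.comp_apply]
    rw [hrow, List.getD_eq_getElem?_getD, List.getElem?_map, List.getElem?_range hi]
    simp only [Option.map_some, Option.getD_some]
    ring

-- ===== VERDICT (by name: the statement is the Claim_ definition above) =====
theorem creaMatriz4_spec : Claim_equal_creaMatriz4 := by
  intro c _
  unfold Spec_creaMatriz4
  rw [pvA_closed, pvB_closed]
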